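-- pv_equiv track=rewrite | github.com/Darkneew/Pentago-AI | graphic version/grid_manipulation.py | grilleToMiniGrille
-- ===== SOURCE A (Python) =====
-- def grilleToMiniGrille(g):
--     L1,L2,L3,L4=[],[],[],[]
--     n = len(g)
--     for i in range(n):
--         if i<n//2:
--             L1.append(g[i][:n//2])
--             L2.append(g[i][n//2:])
--         else :
--             L3.append(g[i][:n//2])
--             L4.append(g[i][n//2:])
--     return([L1,L2,L3,L4])
-- ===== SOURCE B (Python) =====
-- def grilleToMiniGrille(g):
--     h = len(g) // 2
--     quads = [[], [], [], []]
--     for i, row in enumerate(g):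
--         left, right = [], []
--         for j, x in enumerate(row):
--             (left if j < h else right).append(x)
--         base = 0 if i < h else 2
--         quads[base].append(left)
--         quads[base + 1].append(right)
--     return quads
-- ===== Notes on version B (the rewrite author's own statement) =====
-- stated objective: alternative
-- what changed: Replaces A's slice-based row splitting by cell-level distribution: each element is routed one by one into a left/right bucket by its column index (no slicing at all), and the two buckets are appended to the quadrant chosen by the row index.
import Mathlib
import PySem

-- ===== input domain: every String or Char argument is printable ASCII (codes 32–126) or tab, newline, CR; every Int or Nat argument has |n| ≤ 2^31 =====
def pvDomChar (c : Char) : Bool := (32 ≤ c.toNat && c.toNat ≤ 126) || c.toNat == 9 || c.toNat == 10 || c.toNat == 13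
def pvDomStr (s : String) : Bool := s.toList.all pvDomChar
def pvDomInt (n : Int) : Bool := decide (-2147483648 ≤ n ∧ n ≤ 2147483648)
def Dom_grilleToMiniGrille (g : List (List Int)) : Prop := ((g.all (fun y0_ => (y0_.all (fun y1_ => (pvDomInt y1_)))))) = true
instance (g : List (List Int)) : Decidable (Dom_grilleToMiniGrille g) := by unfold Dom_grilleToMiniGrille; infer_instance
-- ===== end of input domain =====

-- B replaces A's slice-based split by cell-level distribution: each element is routed
-- into a left/right bucket by its column index, and the buckets go to the quadrant
-- chosen by the row index; an alternative of the same cost, no slicing at all.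


-- ===== PORT A =====
def grilleToMiniGrille (g : List (List Int)) : List (List (List Int)) :=
  -- L1,L2,L3,L4=[],[],[],[]; n=len(g); for i in range(n): if i<n//2: append slices … else …
  let n : Int := g.length
  let st := (PySem.List.pyRange 0 n 1).foldl
    (fun (s : List (List Int) × List (List Int) × List (List Int) × List (List Int)) i =>
      if i < PySem.Int.floordiv n 2 then
        (s.1 ++ [PySem.List.slice (PySem.List.pyGetD g i []) none (some (PySem.Int.floordiv n 2))],
         s.2.1 ++ [PySem.List.slice (PySem.List.pyGetD g i []) (some (PySem.Int.floordiv n 2)) none],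
         s.2.2.1, s.2.2.2)
      else
        (s.1, s.2.1,
         s.2.2.1 ++ [PySem.List.slice (PySem.List.pyGetD g i []) none (some (PySem.Int.floordiv n 2))],
         s.2.2.2 ++ [PySem.List.slice (PySem.List.pyGetD g i []) (some (PySem.Int.floordiv n 2)) none]))
    ([], [], [], [])
  [st.1, st.2.1, st.2.2.1, st.2.2.2]

-- ===== PORT B =====
-- for i,row in enumerate(g): for j,x in enumerate(row): bucket by j<h; quadrant by i<h
def grilleToMiniGrille_alt (g : List (List Int)) : List (List (List Int)) :=
  let h : Int := PySem.Int.floordiv (g.length : Int) 2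
  let quads := (PySem.List.enumerate g 0).foldl
    (fun (q : List (List Int) × List (List Int) × List (List Int) × List (List Int)) p =>
      let lr := (PySem.List.enumerate p.2 0).foldl
        (fun (lr : List Int × List Int) e =>
          if e.1 < h then (lr.1 ++ [e.2], lr.2) else (lr.1, lr.2 ++ [e.2]))
        ([], [])
      if p.1 < h then (q.1 ++ [lr.1], q.2.1 ++ [lr.2], q.2.2.1, q.2.2.2)
      else (q.1, q.2.1, q.2.2.1 ++ [lr.1], q.2.2.2 ++ [lr.2]))
    ([], [], [], [])
  [quads.1, quads.2.1, quads.2.2.1, quads.2.2.2]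

-- ===== PRECONDITION & SPEC =====
def Spec_grilleToMiniGrille (g : List (List Int)) (out : List (List (List Int))) : Prop := out = grilleToMiniGrille_alt g
instance (g : List (List Int)) (out : List (List (List Int))) : Decidable (Spec_grilleToMiniGrille g out) := by unfold Spec_grilleToMiniGrille; infer_instance

-- ===== CLAIM (what is proved, stated in full; the proofs are below) =====
def Claim_equal_grilleToMiniGrille : Prop := ∀ (g : List (List Int)), Dom_grilleToMiniGrille g → Spec_grilleToMiniGrille g (grilleToMiniGrille g)

-- ===== LEMMAS AND PROOFS =====

-- B's inner loop: routing each element left/right by its index is take/drop at h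
theorem pv_enum_split {α : Type} (row : List α) (h : Int) (s : Int) (l r : List α) :
    (PySem.List.enumerate row s).foldl
      (fun (lr : List α × List α) e =>
        if e.1 < h then (lr.1 ++ [e.2], lr.2) else (lr.1, lr.2 ++ [e.2])) (l, r)
      = (l ++ row.take (h - s).toNat, r ++ row.drop (h - s).toNat) := by
  induction row generalizing s l r with
  | nil => simp [PySem.List.enumerate_nil]
  | cons x t ih =>
    rw [PySem.List.enumerate_cons]
    by_cases hx : s < h
    · have h1 : (h - s).toNat = (h - (s + 1)).toNat + 1 := by omega
      simp only [List.foldl_cons, if_pos hx, ih, h1, List.take_succ_cons, List.drop_succ_cons]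
      simp
    · have h0 : (h - s).toNat = 0 := by omega
      have h0' : (h - (s + 1)).toNat = 0 := by omega
      simp only [List.foldl_cons, if_neg hx, ih, h0, h0', List.take_zero, List.drop_zero]
      simp

-- B's outer loop: four accumulators, branch on the row index
theorem pv_enum_quad {α β : Type} (g : List α) (h : Int) (F1 F2 : α → β) (s : Int)
    (a b c d : List β) :
    (PySem.List.enumerate g s).foldl
      (fun (q : List β × List β × List β × List β) p =>
        if p.1 < h then (q.1 ++ [F1 p.2], q.2.1 ++ [F2 p.2], q.2.2.1, q.2.2.2)
        else (q.1, q.2.1, q.2.2.1 ++ [F1 p.2], q.2.2.2 ++ [F2 p.2])) (a, b, c, d)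
      = (a ++ (g.take (h - s).toNat).map F1, b ++ (g.take (h - s).toNat).map F2,
         c ++ (g.drop (h - s).toNat).map F1, d ++ (g.drop (h - s).toNat).map F2) := by
  induction g generalizing s a b c d with
  | nil => simp [PySem.List.enumerate_nil]
  | cons x t ih =>
    rw [PySem.List.enumerate_cons]
    by_cases hx : s < h
    · have h1 : (h - s).toNat = (h - (s + 1)).toNat + 1 := by omega
      simp only [List.foldl_cons, if_pos hx, ih, h1, List.take_succ_cons, List.drop_succ_cons,
        List.map_cons]
      simp
    · have h0 : (h - s).toNat = 0 := by omega
      have h0' : (h - (s + 1)).toNat = 0 := by omega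
      simp only [List.foldl_cons, if_neg hx, ih, h0, h0', List.take_zero, List.drop_zero,
        List.map_cons]
      simp

-- A's loop with one branch and four appending accumulators, characterised at once.
theorem pv_fold_quad (l : List Int) (P : Int → Prop) [DecidablePred P]
    (F1 F2 : Int → List Int) (a b c d : List (List Int)) :
    l.foldl (fun (s : List (List Int) × List (List Int) × List (List Int) × List (List Int)) i =>
        if P i then (s.1 ++ [F1 i], s.2.1 ++ [F2 i], s.2.2.1, s.2.2.2)
        else (s.1, s.2.1, s.2.2.1 ++ [F1 i], s.2.2.2 ++ [F2 i])) (a, b, c, d)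
      = (a ++ ((l.filter (fun i => decide (P i))).map F1),
         b ++ ((l.filter (fun i => decide (P i))).map F2),
         c ++ ((l.filter (fun i => !decide (P i))).map F1),
         d ++ ((l.filter (fun i => !decide (P i))).map F2)) := by
  induction l generalizing a b c d with
  | nil => simp
  | cons x t ih =>
    simp only [List.foldl_cons, List.filter_cons]
    by_cases hx : P x
    · simp [hx, ih]
    · simp [hx, ih]

-- map of F ∘ (g[i]) over a prefix of indices is F mapped over the row prefix
theorem pv_map_take {α β : Type} [Inhabited α] (g : List α) (h : Nat) (hle : h ≤ g.length)
    (F : α → β) (d : α) :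
    (PySem.List.pyRange 0 (h : Int) 1).map (fun i => F (PySem.List.pyGetD g i d))
      = (g.take h).map F := by
  have hlen : (g.take h).length = h := by simp [hle]
  have hcongr : (PySem.List.pyRange 0 (h : Int) 1).map (fun i => F (PySem.List.pyGetD g i d))
      = (PySem.List.pyRange 0 (h : Int) 1).map (fun i => F (PySem.List.pyGetD (g.take h) i d)) := by
    apply List.map_congr_left
    intro i hi
    rcases (PySem.List.mem_pyRange_one).mp hi with ⟨h0, hh⟩
    have hi1 : i.toNat < h := by omega
    have hi2 : i.toNat < g.length := by omega
    rw [PySem.List.pyGetD_eq_getElem g d h0 (by omega),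
        PySem.List.pyGetD_eq_getElem (g.take h) d h0 (by rw [hlen]; omega)]
    simp
  rw [hcongr,
      show (fun i => F (PySem.List.pyGetD (g.take h) i d))
        = F ∘ (fun i => PySem.List.pyGetD (g.take h) i d) from rfl,
      ← List.map_map]
  have hz := PySem.List.map_pyGetD_pyRange_zero' (g.take h) d
  rw [hlen] at hz
  rw [hz]

theorem pv_map_drop {α β : Type} [Inhabited α] (g : List α) (h : Nat) (_hle : h ≤ g.length)
    (F : α → β) (d : α) :
    (PySem.List.pyRange (h : Int) (g.length : Int) 1).map (fun i => F (PySem.List.pyGetD g i d))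
      = (g.drop h).map F := by
  rw [show (fun i => F (PySem.List.pyGetD g i d))
        = F ∘ (fun i => PySem.List.pyGetD g i d) from rfl,
      ← List.map_map, PySem.List.map_pyGetD_pyRange' g d (by positivity : (0:Int) ≤ (h:Int))]
  simp

-- ===== VERDICT (by name: the statement is the Claim_ definition above) =====
theorem grilleToMiniGrille_spec : Claim_equal_grilleToMiniGrille := by
  intro g _
  show grilleToMiniGrille g = grilleToMiniGrille_alt g
  have hfd : PySem.Int.floordiv (g.length : Int) 2 = ((g.length / 2 : Nat) : Int) := by
    exact_mod_cast PySem.Int.floordiv_natCast g.length 2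
  set h : Nat := g.length / 2 with hh
  have hle : h ≤ g.length := Nat.div_le_self _ _
  -- B side: collapse the two enumerate folds to take/drop maps
  have hB : grilleToMiniGrille_alt g
      = [(g.take h).map (fun r => r.take h), (g.take h).map (fun r => r.drop h),
         (g.drop h).map (fun r => r.take h), (g.drop h).map (fun r => r.drop h)] := by
    simp only [grilleToMiniGrille_alt, hfd, pv_enum_split, pv_enum_quad, List.nil_append,
      Int.sub_zero, Int.toNat_natCast]
  -- A side: collapse the range fold and slices to the same take/drop maps
  rw [hB]
  simp only [grilleToMiniGrille, hfd]
  rw [pv_fold_quad (P := fun i => i < (h : Int))]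
  have hfilt : (PySem.List.pyRange 0 (g.length : Int) 1).filter
      (fun i => decide (i < (h : Int))) = PySem.List.pyRange 0 (h : Int) 1 := by
    rw [PySem.List.pyRange_one_append 0 (h : Int) (g.length : Int) (by positivity) (by exact_mod_cast hle),
        List.filter_append]
    rw [List.filter_eq_self.mpr, List.filter_eq_nil_iff.mpr, List.append_nil]
    · intro i hi
      rcases (PySem.List.mem_pyRange_one).mp hi with ⟨h1, _⟩
      simpa using h1
    · intro i hi
      rcases (PySem.List.mem_pyRange_one).mp hi with ⟨_, h2⟩
      simpa using h2
  have hfilt2 : (PySem.List.pyRange 0 (g.length : Int) 1).filter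
      (fun i => !decide (i < (h : Int))) = PySem.List.pyRange (h : Int) (g.length : Int) 1 := by
    rw [PySem.List.pyRange_one_append 0 (h : Int) (g.length : Int) (by positivity) (by exact_mod_cast hle),
        List.filter_append]
    rw [List.filter_eq_nil_iff.mpr, List.filter_eq_self.mpr, List.nil_append]
    · intro i hi
      rcases (PySem.List.mem_pyRange_one).mp hi with ⟨h1, _⟩
      simpa using h1
    · intro i hi
      rcases (PySem.List.mem_pyRange_one).mp hi with ⟨_, h2⟩
      simpa using h2
  rw [hfilt, hfilt2,
      pv_map_take g h hle (fun r => PySem.List.slice r none (some (h : Int))) [],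
      pv_map_take g h hle (fun r => PySem.List.slice r (some (h : Int)) none) [],
      pv_map_drop g h hle (fun r => PySem.List.slice r none (some (h : Int))) [],
      pv_map_drop g h hle (fun r => PySem.List.slice r (some (h : Int)) none) []]
  simp [PySem.List.slice_to, PySem.List.slice_from]
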